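-- pv_equiv track=rewrite | github.com/umbc-research/finder-chart | gatherStarStats.py | selectCatalog
-- ===== SOURCE A (Python) =====
-- def selectCatalog(catalogs):
--
--     # Loops through list of catalogs and searches for each one in the hierarchy
--     for entry in catalogs:
--          if(entry.startswith("HD")):
--               return entry
--     for entry in catalogs:
--          if(entry.startswith("HIP")):
--               return entry
--     for entry in catalogs:
--          if(entry.startswith("HIC")):
--               return entry
--     for entry in catalogs:
--          if(entry.startswith("2MASS")):
--               return entry
--
--     return
-- ===== SOURCE B (Python) =====
-- PREFIXES = ["HD", "HIP", "HIC", "2MASS"]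
--
-- def selectCatalog(catalogs):
--     # Single pass: keep the best-priority entry seen so far; strict '<'
--     # keeps the earliest entry at a given priority.
--     best = None
--     best_rank = len(PREFIXES)
--     for entry in catalogs:
--         for rank, prefix in enumerate(PREFIXES):
--             if entry.startswith(prefix):
--                 if rank < best_rank:
--                     best_rank = rank
--                     best = entry
--                 break
--     return best
-- ===== Notes on version B (the rewrite author's own statement) =====
-- stated objective: alternative
-- what changed: Replaces four separate scans of the catalog list (one per prefix) with a single pass that keeps the best-priority match seen so far (strict '<' so the earliest entry at a priority wins).
import Mathlib
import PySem

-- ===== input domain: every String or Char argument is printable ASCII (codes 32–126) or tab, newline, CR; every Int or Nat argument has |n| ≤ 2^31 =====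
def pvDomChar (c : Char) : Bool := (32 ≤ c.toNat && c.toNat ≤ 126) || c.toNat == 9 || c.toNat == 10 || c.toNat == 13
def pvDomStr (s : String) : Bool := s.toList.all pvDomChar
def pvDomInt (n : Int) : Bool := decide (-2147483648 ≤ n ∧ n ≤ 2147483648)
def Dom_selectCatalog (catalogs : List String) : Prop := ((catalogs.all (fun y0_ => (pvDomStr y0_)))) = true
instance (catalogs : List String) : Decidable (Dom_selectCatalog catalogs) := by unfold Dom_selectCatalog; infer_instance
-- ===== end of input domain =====

-- B replaces A's four separate scans of the list (one per prefix) by a single pass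
-- keeping the best-priority match seen so far (objective: alternative).

-- ===== PORT A =====
-- each 'for entry in catalogs: if entry.startswith(p): return entry' loop of A

def pvScan (p : String) : List String → Option String
  | [] => none
  | e :: rest => if PySem.Str.startswith e p then some e else pvScan p rest

def selectCatalog (catalogs : List String) : Option String :=
  match pvScan "HD" catalogs with
  | some e => some e
  | none =>
    match pvScan "HIP" catalogs with
    | some e => some e
    | none =>
      match pvScan "HIC" catalogs with
      | some e => some e
      | none =>
        match pvScan "2MASS" catalogs with
        | some e => some e
        | none => none

-- ===== PORT B =====
def pvPrefixes : List String := ["HD", "HIP", "HIC", "2MASS"]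

def pvRankAux (i : Nat) : List String → String → Option Nat
  | [], _ => none
  | p :: ps, e => if PySem.Str.startswith e p then some i else pvRankAux (i + 1) ps e

def pvStep (st : Option String × Nat) (e : String) : Option String × Nat :=
  match pvRankAux 0 pvPrefixes e with
  | none => st
  | some r => if r < st.2 then (some e, r) else st


def selectCatalog_alt (catalogs : List String) : Option String :=
  (catalogs.foldl pvStep (none, pvPrefixes.length)).1

-- ===== PRECONDITION & SPEC =====
def Spec_selectCatalog (catalogs : List String) (out : Option String) : Prop := out = selectCatalog_alt catalogs
instance (catalogs : List String) (out : Option String) : Decidable (Spec_selectCatalog catalogs out) := by unfold Spec_selectCatalog; infer_instance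

-- ===== CLAIM (what is proved, stated in full; the proofs are below) =====
def Claim_equal_selectCatalog : Prop := ∀ (catalogs : List String), Dom_selectCatalog catalogs → Spec_selectCatalog catalogs (selectCatalog catalogs)

-- ===== LEMMAS AND PROOFS =====

theorem pvExcl {l p q : List Char} (hp : p.length ≤ q.length)
    (hnp : ¬ p <+: q)
    (h1 : PySem.Chars.startswith l p = true) : PySem.Chars.startswith l q = false := by
  rw [← Bool.not_eq_true]
  intro h2
  rw [PySem.Chars.startswith_iff] at h1 h2
  exact hnp (List.prefix_of_prefix_length_le h1 h2 hp)

theorem pvKey (cs : List String) : ∀ (b : Option String) (r : Nat),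
    (cs.foldl pvStep (b, r)).1 =
      if 0 < r ∧ (pvScan "HD" cs).isSome then pvScan "HD" cs
      else if 1 < r ∧ (pvScan "HIP" cs).isSome then pvScan "HIP" cs
      else if 2 < r ∧ (pvScan "HIC" cs).isSome then pvScan "HIC" cs
      else if 3 < r ∧ (pvScan "2MASS" cs).isSome then pvScan "2MASS" cs
      else b := by
  induction cs with
  | nil => intro b r; simp [pvScan]
  | cons e t ih =>
    intro b r
    rw [List.foldl_cons]
    cases h0 : PySem.Chars.startswith e.toList ['H', 'D'] with
    | true =>
      have h1 := pvExcl (q := ['H', 'I', 'P']) (by decide) (by decide) h0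
      have h2 := pvExcl (q := ['H', 'I', 'C']) (by decide) (by decide) h0
      have h3 := pvExcl (q := ['2', 'M', 'A', 'S', 'S']) (by decide) (by decide) h0
      rw [show pvStep (b, r) e = if 0 < r then (some e, 0) else (b, r) by
        simp [pvStep, pvPrefixes, pvRankAux, h0]]
      rw [show pvScan "HD" (e :: t) = some e by simp [pvScan, h0]]
      rw [show pvScan "HIP" (e :: t) = pvScan "HIP" t by simp [pvScan, h1]]
      rw [show pvScan "HIC" (e :: t) = pvScan "HIC" t by simp [pvScan, h2]]
      rw [show pvScan "2MASS" (e :: t) = pvScan "2MASS" t by simp [pvScan, h3]]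
      by_cases hr : 0 < r
      · rw [if_pos hr, ih]; simp [hr]
      · rw [if_neg hr, ih]; simp [hr]
    | false =>
      cases h1 : PySem.Chars.startswith e.toList ['H', 'I', 'P'] with
      | true =>
        have h2 := pvExcl (q := ['H', 'I', 'C']) (by decide) (by decide) h1
        have h3 := pvExcl (q := ['2', 'M', 'A', 'S', 'S']) (by decide) (by decide) h1
        rw [show pvStep (b, r) e = if 1 < r then (some e, 1) else (b, r) by
          simp [pvStep, pvPrefixes, pvRankAux, h0, h1]]
        rw [show pvScan "HD" (e :: t) = pvScan "HD" t by simp [pvScan, h0]]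
        rw [show pvScan "HIP" (e :: t) = some e by simp [pvScan, h1]]
        rw [show pvScan "HIC" (e :: t) = pvScan "HIC" t by simp [pvScan, h2]]
        rw [show pvScan "2MASS" (e :: t) = pvScan "2MASS" t by simp [pvScan, h3]]
        by_cases hr : 1 < r
        · rw [if_pos hr, ih]
          have hr0 : 0 < r := by omega
          cases hHD : pvScan "HD" t <;> simp [hr, hr0]
        · rw [if_neg hr, ih]; simp [hr]
      | false =>
        cases h2 : PySem.Chars.startswith e.toList ['H', 'I', 'C'] with
        | true =>
          have h3 := pvExcl (q := ['2', 'M', 'A', 'S', 'S']) (by decide) (by decide) h2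
          rw [show pvStep (b, r) e = if 2 < r then (some e, 2) else (b, r) by
            simp [pvStep, pvPrefixes, pvRankAux, h0, h1, h2]]
          rw [show pvScan "HD" (e :: t) = pvScan "HD" t by simp [pvScan, h0]]
          rw [show pvScan "HIP" (e :: t) = pvScan "HIP" t by simp [pvScan, h1]]
          rw [show pvScan "HIC" (e :: t) = some e by simp [pvScan, h2]]
          rw [show pvScan "2MASS" (e :: t) = pvScan "2MASS" t by simp [pvScan, h3]]
          by_cases hr : 2 < r
          · rw [if_pos hr, ih]
            have hr0 : 0 < r := by omega
            have hr1 : 1 < r := by omega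
            cases hHD : pvScan "HD" t <;> cases hHIP : pvScan "HIP" t <;>
              simp [hr, hr0, hr1]
          · rw [if_neg hr, ih]
            have hx : ¬ 3 < r := by omega
            simp [hr, hx]
        | false =>
          cases h3 : PySem.Chars.startswith e.toList ['2', 'M', 'A', 'S', 'S'] with
          | true =>
            rw [show pvStep (b, r) e = if 3 < r then (some e, 3) else (b, r) by
              simp [pvStep, pvPrefixes, pvRankAux, h0, h1, h2, h3]]
            rw [show pvScan "HD" (e :: t) = pvScan "HD" t by simp [pvScan, h0]]
            rw [show pvScan "HIP" (e :: t) = pvScan "HIP" t by simp [pvScan, h1]]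
            rw [show pvScan "HIC" (e :: t) = pvScan "HIC" t by simp [pvScan, h2]]
            rw [show pvScan "2MASS" (e :: t) = some e by simp [pvScan, h3]]
            by_cases hr : 3 < r
            · rw [if_pos hr, ih]
              have hr0 : 0 < r := by omega
              have hr1 : 1 < r := by omega
              have hr2 : 2 < r := by omega
              cases hHD : pvScan "HD" t <;> cases hHIP : pvScan "HIP" t <;>
                cases hHIC : pvScan "HIC" t <;> simp [hr, hr0, hr1, hr2]
            · rw [if_neg hr, ih]; simp [hr]
          | false =>
            rw [show pvStep (b, r) e = (b, r) by
              simp [pvStep, pvPrefixes, pvRankAux, h0, h1, h2, h3]]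
            rw [show pvScan "HD" (e :: t) = pvScan "HD" t by simp [pvScan, h0]]
            rw [show pvScan "HIP" (e :: t) = pvScan "HIP" t by simp [pvScan, h1]]
            rw [show pvScan "HIC" (e :: t) = pvScan "HIC" t by simp [pvScan, h2]]
            rw [show pvScan "2MASS" (e :: t) = pvScan "2MASS" t by simp [pvScan, h3]]
            exact ih b r

-- ===== VERDICT (by name: the statement is the Claim_ definition above) =====
theorem selectCatalog_spec : Claim_equal_selectCatalog := by
  intro cs _
  unfold Spec_selectCatalog selectCatalog_alt
  rw [show pvPrefixes.length = 4 from rfl, pvKey]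
  cases hA : pvScan "HD" cs <;> cases hB : pvScan "HIP" cs <;>
    cases hC : pvScan "HIC" cs <;> cases hD : pvScan "2MASS" cs <;>
      simp [selectCatalog, hA, hB, hC, hD]
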